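-- pv_equiv track=rewrite | github.com/TOCWT2025/Oberlin-Winter-Term-2025- | ps1a.py | cow_transport_1
-- ===== SOURCE A (Python) =====
-- def cow_transport_1(cows,limit=10):
--     """
--     Does one trip!
--     """
--     highest = ()
--     highestval = 0
--     retval = []
--     legacy = []
--     cowval = list(cows.values())
--     cow = list(cows.keys())
--     while limit>=0:
--         for i in range(len(cows)):
--             if int(cowval[i]) > highestval and int(cowval[i])<=limit and cow[i] not in legacy:
--                 highestval = int(cowval[i])
--                 highest = cow[i]
--         if highestval > 0:
--             retval.append(highest)
--         else:
--             return retval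
--         limit = limit - highestval
--         legacy.append(highest)
--         highestval = 0
--         highest = ()
-- ===== SOURCE B (Python) =====
-- def cow_transport_1(cows, limit=10):
--     """
--     Does one trip: repeatedly taking the most valuable cow that still fits is the
--     same as one pass over the cows sorted by value, descending (stable).
--     """
--     trip = []
--     for name, val in sorted(cows.items(), key=lambda kv: kv[1], reverse=True):
--         v = int(val)
--         if 0 < v <= limit:
--             trip.append(name)
--             limit -= v
--     return trip
-- ===== Notes on version B (the rewrite author's own statement) =====
-- stated objective: faster
-- what changed: A rescans the whole herd once per picked cow to find the best remaining fit; B sorts the cows by value once, descending and stable, and makes a single greedy pass that takes each cow that still fits, which provably yields the same trip in the same order.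
-- outside the precondition, e.g. on cow_transport_1({}, -1): A returns None, B returns []
import Mathlib
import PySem

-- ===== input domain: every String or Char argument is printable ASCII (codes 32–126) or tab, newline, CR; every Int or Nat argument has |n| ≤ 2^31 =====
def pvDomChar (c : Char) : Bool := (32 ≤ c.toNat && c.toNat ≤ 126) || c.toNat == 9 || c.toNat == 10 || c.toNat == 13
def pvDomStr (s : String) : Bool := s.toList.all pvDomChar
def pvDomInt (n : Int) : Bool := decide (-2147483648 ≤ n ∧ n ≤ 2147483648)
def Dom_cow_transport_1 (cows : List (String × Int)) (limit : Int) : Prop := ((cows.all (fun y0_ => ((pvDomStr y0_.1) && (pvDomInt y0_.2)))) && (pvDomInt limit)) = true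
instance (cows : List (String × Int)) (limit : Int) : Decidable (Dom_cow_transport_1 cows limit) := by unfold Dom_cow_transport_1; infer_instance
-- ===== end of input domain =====

-- B replaces A's repeated full rescans for the best remaining cow by one stable
-- value-descending sort followed by a single greedy pass (objective: faster).


-- ===== PORT A =====
-- the inner 'for i in range(len(cows))' scan: running strict max of eligible cows
def pvInnerA (items : List (String × Int)) (limit : Int) (legacy : List String) :
    Int × Option String :=
  items.foldl (fun st p =>
    if st.1 < p.2 ∧ p.2 ≤ limit ∧ p.1 ∉ legacy then (p.2, some p.1) else st)
    (0, none)

-- the 'while limit >= 0' loop; fuel limit.toNat+1 suffices because each pass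
-- subtracts a positive highestval ≤ limit (proved below); the 'limit < 0' exit
-- (Python: falling off the while, returning None) is outside Pre_.
def pvLoopA (items : List (String × Int)) :
    Nat → Int → List String → List String → List String
  | 0, _, _, retval => retval
  | fuel + 1, limit, legacy, retval =>
    if limit < 0 then retval
    else
      let r := pvInnerA items limit legacy
      if 0 < r.1 then
        match r.2 with
        | some name =>
            pvLoopA items fuel (limit - r.1) (legacy ++ [name]) (retval ++ [name])
        | none => retval
      else retval

def cow_transport_1 (cows : List (String × Int)) (limit : Int) : List String :=
  pvLoopA (PySem.Dict.ofList cows).items (limit.toNat + 1) limit [] []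

-- ===== PORT B =====
def cow_transport_1_alt (cows : List (String × Int)) (limit : Int) : List String :=
  ((PySem.List.sorted (PySem.Dict.ofList cows).items (fun kv => kv.2) true).foldl
    (fun st p => if 0 < p.2 ∧ p.2 ≤ st.2 then (st.1 ++ [p.1], st.2 - p.2) else st)
    (([] : List String), limit)).1

-- ===== PRECONDITION & SPEC =====
-- Pre_ excludes limit < 0, where Python A never enters its while loop and falls
-- off the end returning None, which is not a value of the declared list type.
def Pre_cow_transport_1 (cows : List (String × Int)) (limit : Int) : Prop := 0 ≤ limit
instance (cows : List (String × Int)) (limit : Int) : Decidable (Pre_cow_transport_1 cows limit) := by unfold Pre_cow_transport_1; infer_instance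
def pvWitness_cow_transport_1 : (List (String × Int)) × Int := ([("bessie", 3), ("elsie", 5)], 6)

def Spec_cow_transport_1 (cows : List (String × Int)) (limit : Int) (out : List String) : Prop := out = cow_transport_1_alt cows limit
instance (cows : List (String × Int)) (limit : Int) (out : List String) : Decidable (Spec_cow_transport_1 cows limit out) := by unfold Spec_cow_transport_1; infer_instance

-- ===== CLAIM (what is proved, stated in full; the proofs are below) =====
def Claim_equal_cow_transport_1 : Prop := ∀ (cows : List (String × Int)) (limit : Int), Dom_cow_transport_1 cows limit → Pre_cow_transport_1 cows limit → Spec_cow_transport_1 cows limit (cow_transport_1 cows limit)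

-- ===== LEMMAS AND PROOFS =====

-- eligibility of a cow at remaining capacity `rem` with already-picked names `used`
def pvElig (rem : Int) (used : List String) (p : String × Int) : Bool :=
  decide (0 < p.2) && decide (p.2 ≤ rem ∧ p.1 ∉ used)

-- B's single pass, as a recursion (proof-side view of B's fold)
def pvGreedy : List (String × Int) → Int → List String
  | [], _ => []
  | p :: t, rem =>
      if 0 < p.2 ∧ p.2 ≤ rem then p.1 :: pvGreedy t (rem - p.2) else pvGreedy t rem

-- the strict-running-max step of A's inner scan
def pvF (st : Int × Option String) (p : String × Int) : Int × Option String :=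
  if st.1 < p.2 then (p.2, some p.1) else st

lemma pvFoldB_eq_greedy (l : List (String × Int)) (acc : List String) (rem : Int) :
    (l.foldl (fun st p => if 0 < p.2 ∧ p.2 ≤ st.2 then (st.1 ++ [p.1], st.2 - p.2) else st)
      (acc, rem)).1 = acc ++ pvGreedy l rem := by
  induction l generalizing acc rem with
  | nil => simp [pvGreedy]
  | cons p t ih =>
      simp only [List.foldl_cons, pvGreedy]
      split_ifs with h <;> simp [ih]

lemma pvRunMax_go (l : List (String × Int)) (acc : Int × Option String) :
    l.foldl pvF acc =
      (l.foldl (fun m p => max m p.2) acc.1,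
       if acc.1 < l.foldl (fun m p => max m p.2) acc.1 then
         (l.find? (fun p => decide (l.foldl (fun m p => max m p.2) acc.1 ≤ p.2))).map (·.1)
       else acc.2) := by
  induction l generalizing acc with
  | nil => simp
  | cons q t ih =>
      simp only [List.foldl_cons, List.find?]
      by_cases hq : acc.1 < q.2
      · have hmax : max acc.1 q.2 = q.2 := by omega
        rw [show pvF acc q = (q.2, some q.1) by simp [pvF, hq]]
        rw [ih (q.2, some q.1)]
        have hle : q.2 ≤ t.foldl (fun m p => max m p.2) q.2 :=
          (PySem.List.le_foldl_max_int t (fun p => p.2) q.2).1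
        simp only [hmax]
        by_cases hlt : q.2 < t.foldl (fun m p => max m p.2) q.2
        · have : ¬ (t.foldl (fun m p => max m p.2) q.2 ≤ q.2) := by omega
          simp [hlt, this, show acc.1 < t.foldl (fun m p => max m p.2) q.2 by omega]
        · have heq : t.foldl (fun m p => max m p.2) q.2 = q.2 := by omega
          simp [heq, hq]
      · have hmax : max acc.1 q.2 = acc.1 := by omega
        rw [show pvF acc q = acc by simp [pvF, hq]]
        rw [ih acc]
        simp only [hmax]
        by_cases hlt : acc.1 < t.foldl (fun m p => max m p.2) acc.1
        · have : ¬ (t.foldl (fun m p => max m p.2) acc.1 ≤ q.2) := by omega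
          simp [hlt, this]
        · simp [hlt]

lemma pvFoldMax_le (l : List (String × Int)) (a b : Int) (ha : a ≤ b)
    (h : ∀ p ∈ l, p.2 ≤ b) : l.foldl (fun m p => max m p.2) a ≤ b := by
  induction l generalizing a with
  | nil => simpa
  | cons q t ih =>
      simp only [List.foldl_cons]
      exact ih (max a q.2) (by have := h q (by simp); omega)
        (fun p hp => h p (by simp [hp]))

lemma pvFoldF_pos_filter (l : List (String × Int)) (acc : Int × Option String)
    (hacc : 0 ≤ acc.1) :
    l.foldl pvF acc = (l.filter (fun p => decide (0 < p.2))).foldl pvF acc := by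
  induction l generalizing acc with
  | nil => rfl
  | cons q t ih =>
      simp only [List.foldl_cons, List.filter_cons]
      by_cases hq : 0 < q.2
      · simp only [hq, decide_true, if_true, List.foldl_cons]
        apply ih
        by_cases h : acc.1 < q.2 <;> simp [pvF, h] <;> omega
      · have : pvF acc q = acc := by
          simp only [pvF, if_neg (show ¬ acc.1 < q.2 by omega)]
        simp only [hq, decide_false, this]
        exact ih acc hacc

lemma pvInner_split (items : List (String × Int)) (rem : Int) (used : List String) :
    pvInnerA items rem used = (items.filter (pvElig rem used)).foldl pvF (0, none) := by
  unfold pvInnerA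
  rw [PySem.List.foldl_congr_mem
      (g := fun st p => if (p.2 ≤ rem ∧ p.1 ∉ used) then pvF st p else st)]
  · rw [PySem.List.foldl_ite_eq_foldl_filter (p := fun p : String × Int => p.2 ≤ rem ∧ p.1 ∉ used)]
    rw [pvFoldF_pos_filter _ _ (by simp)]
    rw [List.filter_filter]
    rfl
  · intro acc p _
    by_cases h1 : p.2 ≤ rem ∧ p.1 ∉ used
    · by_cases h2 : acc.1 < p.2 <;> simp [pvF, h1, h2]
    · simp [h1]

lemma pvFilter_of_imp (l : List (String × Int)) (E E' : (String × Int) → Bool)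
    (himp : ∀ a, E' a = true → E a = true) :
    (l.filter E).filter E' = l.filter E' := by
  rw [List.filter_filter]
  apply List.filter_congr
  intro x _
  cases h : E' x
  · simp
  · simp [himp x h]

lemma pvInsertBy_nil {α : Type} (before : α → α → Bool) (x : α) :
    PySem.List.insertBy before x [] = [x] := rfl

lemma pvInsertBy_cons {α : Type} (before : α → α → Bool) (x y : α) (ys : List α) :
    PySem.List.insertBy before x (y :: ys)
      = if before x y then x :: y :: ys else y :: PySem.List.insertBy before x ys := rfl

-- stability of Python's reverse sort: cows of one given value keep their order
lemma pvFilter_insertBy (x : String × Int) (ys : List (String × Int)) (c : Int)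
    (h : ys.Pairwise (fun a b => b.2 ≤ a.2)) :
    (PySem.List.insertBy (fun a b => decide (b.2 < a.2)) x ys).filter (fun p => p.2 == c)
      = ys.filter (fun p => p.2 == c) ++ (if x.2 == c then [x] else []) := by
  induction ys with
  | nil =>
      rw [pvInsertBy_nil]
      by_cases hc : x.2 == c <;> simp [hc]
  | cons y t ih =>
      rcases List.pairwise_cons.mp h with ⟨hy, ht⟩
      rw [pvInsertBy_cons]
      by_cases hb : y.2 < x.2
      · rw [if_pos (decide_eq_true hb)]
        by_cases hc : x.2 == c
        · have hxc : x.2 = c := by simpa using hc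
          have hnil : (y :: t).filter (fun p => p.2 == c) = [] := by
            rw [List.filter_eq_nil_iff]
            intro p hp
            have : p.2 ≤ y.2 := by
              rcases List.mem_cons.mp hp with h | h
              · simp [h]
              · exact hy p h
            simp only [beq_iff_eq]
            omega
          simp [hc, hnil]
        · simp [hc, List.filter_cons]
      · rw [if_neg (by simpa using hb), List.filter_cons, List.filter_cons, ih ht]
        split_ifs <;> simp

lemma pvSorted_stable (xs : List (String × Int)) (c : Int) :
    (PySem.List.sorted xs (fun p => p.2) true).filter (fun p => p.2 == c)
      = xs.filter (fun p => p.2 == c) := by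
  rw [PySem.List.sorted_rev_eq_foldl_insertBy]
  suffices h : ∀ (l : List (String × Int)) (acc : List (String × Int)),
      acc.Pairwise (fun a b => b.2 ≤ a.2) →
      (l.foldl (fun acc x => PySem.List.insertBy (fun a b => decide (b.2 < a.2)) x acc) acc).filter
          (fun p => p.2 == c)
        = acc.filter (fun p => p.2 == c) ++ l.filter (fun p => p.2 == c) by
    simpa using h xs [] (by simp)
  intro l
  induction l with
  | nil => intro acc _; simp
  | cons x t ih =>
      intro acc hacc
      simp only [List.foldl_cons]
      rw [ih _ (PySem.List.insertBy_pairwise_ge (fun p : String × Int => p.2) x acc hacc)]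
      rw [pvFilter_insertBy x acc c hacc]
      simp [List.filter_cons]
      split_ifs <;> simp

-- A's inner scan returns exactly the head of the eligible part of the sorted list
lemma pvPick_eq (l t : List (String × Int)) (hperm : t.Perm l)
    (hdesc : t.Pairwise (fun a b => b.2 ≤ a.2))
    (hstab : ∀ c : Int, t.filter (fun p => p.2 == c) = l.filter (fun p => p.2 == c))
    (hpos : ∀ p ∈ l, 0 < p.2) :
    l.foldl pvF (0, none) =
      (match t with
       | [] => ((0 : Int), (none : Option String))
       | p :: _ => (p.2, some p.1)) := by
  rw [pvRunMax_go]
  cases t with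
  | nil =>
      have hl : l = [] := hperm.symm.eq_nil
      simp [hl]
  | cons p₀ t' =>
      have hmem : p₀ ∈ l := hperm.mem_iff.mp (by simp)
      have hub : ∀ q ∈ l, q.2 ≤ p₀.2 := by
        intro q hq
        rcases List.mem_cons.mp (hperm.mem_iff.mpr hq) with h | h
        · simp [h]
        · exact (List.pairwise_cons.mp hdesc).1 q h
      have hp0 : 0 < p₀.2 := hpos p₀ hmem
      set M := l.foldl (fun m p => max m p.2) (0 : Int) with hM
      have hMle : M ≤ p₀.2 := pvFoldMax_le l 0 p₀.2 (by omega) hub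
      have hple : p₀.2 ≤ M := (PySem.List.le_foldl_max_int l (fun p => p.2) 0).2 p₀ hmem
      have hMeq : M = p₀.2 := by omega
      have h0M : (0 : Int) < M := by omega
      have hfind : l.find? (fun p => decide (M ≤ p.2)) = some p₀ := by
        rw [← List.head?_filter]
        rw [List.filter_congr (q := fun p : String × Int => p.2 == M)
            (by intro x hx
                have hxle : x.2 ≤ M := le_trans (hub x hx) (le_of_eq hMeq.symm)
                by_cases h : x.2 = M
                · simp [h]
                · have hlt : ¬ (M ≤ x.2) := fun hc => h (le_antisymm hxle hc)
                  simp [hlt, h])]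
        rw [← hstab M]
        simp [hMeq]
      simp only [if_pos h0M, hfind, Option.map_some]
      simp [hMeq]

lemma pvInner_eq_head (items : List (String × Int)) (rem : Int) (used : List String) :
    pvInnerA items rem used =
      (match (PySem.List.sorted items (fun p => p.2) true).filter (pvElig rem used) with
       | [] => ((0 : Int), (none : Option String))
       | p :: _ => (p.2, some p.1)) := by
  rw [pvInner_split]
  apply pvPick_eq
  · exact (PySem.List.sorted_perm items (fun p => p.2) true).filter _
  · exact (PySem.List.sorted_pairwise_rev items (fun p => p.2)).sublist List.filter_sublist
  · intro c
    have hcomm : ∀ (m : List (String × Int)),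
        (m.filter (pvElig rem used)).filter (fun p => p.2 == c)
          = (m.filter (fun p => p.2 == c)).filter (pvElig rem used) := by
      intro m
      rw [List.filter_filter, List.filter_filter]
      exact List.filter_congr (by intro x _; exact Bool.and_comm _ _)
    rw [hcomm, hcomm, pvSorted_stable]
  · intro p hp
    have := (List.mem_filter.mp hp).2
    simp [pvElig] at this
    exact this.1

-- the main loop: A's repeated rescans walk down the sorted list exactly like B
lemma pvLoopA_eq_greedy (items : List (String × Int)) :
    ∀ (s' : List (String × Int)) (fuel : Nat) (rem : Int) (legacy retval : List String),
      (PySem.List.sorted items (fun p => p.2) true).filter (pvElig rem legacy)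
        = s'.filter (pvElig rem legacy) →
      0 ≤ rem → rem.toNat < fuel →
      (∀ q ∈ s', q.1 ∉ legacy) →
      (s'.map Prod.fst).Nodup →
      pvLoopA items fuel rem legacy retval = retval ++ pvGreedy s' rem := by
  intro s'
  induction s' with
  | nil =>
      intro fuel rem legacy retval h1 h2 h3 _ _
      obtain ⟨f, rfl⟩ : ∃ f, fuel = f + 1 := ⟨fuel - 1, by omega⟩
      simp only [pvLoopA, if_neg (show ¬ rem < 0 by omega)]
      rw [pvInner_eq_head]
      simp only [h1, List.filter_nil]
      simp [pvGreedy]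
  | cons p t ih =>
      intro fuel rem legacy retval h1 h2 h3 h4 h5
      by_cases hp : 0 < p.2 ∧ p.2 ≤ rem
      · have hnl : p.1 ∉ legacy := h4 p (by simp)
        have hep : pvElig rem legacy p = true := by simp [pvElig, hp.1, hp.2, hnl]
        have h1' : (PySem.List.sorted items (fun p => p.2) true).filter (pvElig rem legacy)
            = p :: t.filter (pvElig rem legacy) := by
          rw [h1, List.filter_cons, if_pos hep]
        obtain ⟨f, rfl⟩ : ∃ f, fuel = f + 1 := ⟨fuel - 1, by omega⟩
        simp only [pvLoopA, if_neg (show ¬ rem < 0 by omega)]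
        rw [pvInner_eq_head, h1']
        simp only [if_pos hp.1]
        have hmono : ∀ a : String × Int,
            pvElig (rem - p.2) (legacy ++ [p.1]) a = true → pvElig rem legacy a = true := by
          intro a ha
          simp only [pvElig, Bool.and_eq_true, decide_eq_true_eq] at ha ⊢
          refine ⟨ha.1, by omega, fun hm => ha.2.2 (by simp [hm])⟩
        have h1'' : (PySem.List.sorted items (fun p => p.2) true).filter
              (pvElig (rem - p.2) (legacy ++ [p.1]))
            = t.filter (pvElig (rem - p.2) (legacy ++ [p.1])) := by
          rw [← pvFilter_of_imp _ _ _ hmono, h1,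
              pvFilter_of_imp _ _ _ hmono, List.filter_cons,
              if_neg (by simp [pvElig])]
        rw [List.map_cons, List.nodup_cons] at h5
        have hnodup : p.1 ∉ t.map Prod.fst := h5.1
        rw [ih f (rem - p.2) (legacy ++ [p.1]) (retval ++ [p.1]) h1''
            (by omega) (by omega)
            (by intro q hq
                simp only [List.mem_append, List.mem_singleton, not_or]
                exact ⟨h4 q (by simp [hq]),
                       fun he => hnodup (he ▸ List.mem_map_of_mem hq)⟩)
            h5.2]
        simp [pvGreedy, if_pos hp]
      · have hep : pvElig rem legacy p = false := by
          simp only [pvElig, Bool.and_eq_false_iff, decide_eq_false_iff_not]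
          by_cases h : 0 < p.2
          · right; intro hc; exact hp ⟨h, hc.1⟩
          · left; exact h
        have h1' : (PySem.List.sorted items (fun p => p.2) true).filter (pvElig rem legacy)
            = t.filter (pvElig rem legacy) := by
          rw [h1, List.filter_cons, if_neg (by simp [hep])]
        rw [List.map_cons, List.nodup_cons] at h5
        rw [ih fuel rem legacy retval h1' h2 h3
            (fun q hq => h4 q (by simp [hq]))
            h5.2]
        simp [pvGreedy, if_neg hp]

-- ===== VERDICT (by name: the statement is the Claim_ definition above) =====
theorem cow_transport_1_spec : Claim_equal_cow_transport_1 := by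
  intro cows limit _ hpre
  unfold Spec_cow_transport_1 cow_transport_1 cow_transport_1_alt
  set items := (PySem.Dict.ofList cows).items with hitems
  have hkeys : (items.map Prod.fst).Nodup := PySem.Dict.nodup_keys_ofList cows
  have hsnodup :
      ((PySem.List.sorted items (fun p => p.2) true).map Prod.fst).Nodup :=
    (((PySem.List.sorted_perm items (fun p => p.2) true).map Prod.fst).nodup_iff).mpr hkeys
  rw [pvLoopA_eq_greedy items (PySem.List.sorted items (fun p => p.2) true)
      (limit.toNat + 1) limit [] [] rfl hpre (by omega) (by simp) hsnodup]
  rw [pvFoldB_eq_greedy]
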